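-- pv_equiv track=rewrite | github.com/super30admin/Miscallaneous-5 | remove-consequetive-characters.py | removeContinuous
-- ===== SOURCE A (Python) =====
-- def removeContinuous(s):
--     # Use a stack to keep track of incoming characters and relative frequency
--     st = []
--     for ch in s:
--         # If the incoming character is equal to top of stack
--         if st and st[-1][0] == ch:
--             # Check the relative frequency
--             count = st[-1][1] + 1
--             # If it is > 2, pop
--             if count > 2:
--                 while st and count != 1:
--                     st.pop()
--                     count -= 1
--             else:
--                 # Push the character along with it's relative frequency on the stack
--                 st.append((ch, count))
--         else:
--             st.append((ch, 1))
--     res = ""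
--     # Extract the character from stack and build output string
--     for ch, count in st:
--         res += ch
--     return res
-- ===== SOURCE B (Python) =====
-- def removeContinuous(s):
--     # Fixpoint rewrite: repeatedly delete the leftmost run of three equal
--     # consecutive characters until no such run remains.
--     t = list(s)
--     while True:
--         for i in range(len(t) - 2):
--             if t[i] == t[i + 1] == t[i + 2]:
--                 del t[i:i + 3]
--                 break
--         else:
--             return "".join(t)
-- ===== Notes on version B (the rewrite author's own statement) =====
-- stated objective: alternative
-- what changed: Replaced the single-pass (char,count) stack with a fixpoint rewrite that repeatedly scans for and deletes the leftmost triple of equal consecutive characters until none remains; no stack or counts are maintained.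
import Mathlib
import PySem

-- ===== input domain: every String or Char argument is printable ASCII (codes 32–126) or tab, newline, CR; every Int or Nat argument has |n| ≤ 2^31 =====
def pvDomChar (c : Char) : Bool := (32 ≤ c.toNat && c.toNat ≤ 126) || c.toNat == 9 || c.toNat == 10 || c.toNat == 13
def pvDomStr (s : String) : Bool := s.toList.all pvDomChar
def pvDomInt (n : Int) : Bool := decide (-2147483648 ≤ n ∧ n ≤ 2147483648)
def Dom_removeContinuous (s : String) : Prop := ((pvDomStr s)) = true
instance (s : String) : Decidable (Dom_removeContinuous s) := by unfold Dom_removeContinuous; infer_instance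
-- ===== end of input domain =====

-- B replaces A's single-pass (char,count) stack by a fixpoint rewrite deleting the
-- leftmost triple of equal adjacent characters until none remains (alternative algorithm).

-- ===== PORT A =====
-- The Python stack (top = last) is stored head-first: head of the list = top of stack.
-- `while st and count != 1: st.pop(); count -= 1`
def popLoopA : List (Char × Nat) → Nat → List (Char × Nat)
  | [], _ => []
  | st@(_ :: rest), count => if count ≠ 1 then popLoopA rest (count - 1) else st

-- one iteration of `for ch in s`
def stepA (st : List (Char × Nat)) (ch : Char) : List (Char × Nat) :=
  match st with
  | [] => (ch, 1) :: []                      -- st empty: append (ch, 1)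
  | (c, k) :: _ =>
    if c = ch then
      let count := k + 1
      if count > 2 then popLoopA st count
      else (ch, count) :: st                 -- append (ch, count)
    else (ch, 1) :: st                       -- append (ch, 1)

def removeContinuous (s : String) : String :=
  let st := s.toList.foldl stepA []
  -- `for ch, count in st: res += ch` iterates bottom→top, i.e. over st.reverse here
  st.reverse.foldl (fun (res : String) p => res.push p.1) ""

-- ===== PORT B =====
-- the inner for-loop: delete the leftmost [x,x,x]; none = no triple (the loop fell through)
def delFirst : List Char → Option (List Char)
  | a :: b :: c :: rest =>
    if a = b ∧ b = c then some rest
    else (delFirst (b :: c :: rest)).map (a :: ·)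
  | _ => none

-- needed by fixB's termination
theorem delFirst_length : ∀ {l t : List Char}, delFirst l = some t → t.length < l.length := by
  intro l
  induction l with
  | nil => intro t h; simp [delFirst] at h
  | cons a m ih =>
    intro t h
    match m, h with
    | b :: c :: rest, h =>
      simp only [delFirst] at h
      split at h
      · cases h; simp; omega
      · rcases Option.map_eq_some_iff.mp h with ⟨t', ht', rfl⟩
        have := ih ht'
        simp only [List.length_cons] at *
        omega
    | [], h => simp [delFirst] at h
    | [b], h => simp [delFirst] at h

-- the outer `while True` loop
def fixB (l : List Char) : List Char :=
  match h : delFirst l with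
  | some t => fixB t
  | none => l
termination_by l.length
decreasing_by exact delFirst_length h

def removeContinuous_alt (s : String) : String := String.ofList (fixB s.toList)

-- ===== PRECONDITION & SPEC =====
def Spec_removeContinuous (s : String) (out : String) : Prop := out = removeContinuous_alt s
instance (s : String) (out : String) : Decidable (Spec_removeContinuous s out) := by unfold Spec_removeContinuous; infer_instance

-- ===== CLAIM (what is proved, stated in full; the proofs are below) =====
def Claim_equal_removeContinuous : Prop := ∀ (s : String), Dom_removeContinuous s → Spec_removeContinuous s (removeContinuous s)

-- ===== LEMMAS AND PROOFS =====

theorem fixB_none {l : List Char} (h : delFirst l = none) : fixB l = l := by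
  rw [fixB, h]

theorem fixB_some {l t : List Char} (h : delFirst l = some t) : fixB l = fixB t := by
  rw [fixB, h]

-- canonical stack: push only, counts = current run length
def pushC (st : List (Char × Nat)) (c : Char) : List (Char × Nat) :=
  match st with
  | (d, k) :: _ => if d = c then (c, k + 1) :: st else (c, 1) :: st
  | [] => [(c, 1)]

def stk (w : List Char) : List (Char × Nat) := w.foldl pushC []

theorem stk_append_one (w : List Char) (c : Char) : stk (w ++ [c]) = pushC (stk w) c := by
  simp [stk, List.foldl_append]

theorem pushC_cons (st : List (Char × Nat)) (c : Char) :
    ∃ k, pushC st c = (c, k) :: st := by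
  cases st with
  | nil => exact ⟨1, rfl⟩
  | cons p rest =>
    obtain ⟨d, k⟩ := p
    by_cases h : d = c <;> simp [pushC, h]

theorem rep_stk (w : List Char) : (stk w).reverse.map Prod.fst = w := by
  induction w using List.reverseRecOn with
  | nil => simp [stk]
  | append_singleton w c ih =>
    rw [stk_append_one]
    obtain ⟨k, hk⟩ := pushC_cons (stk w) c
    rw [hk]; simp [ih]

-- structural decomposition of a canonical stack
theorem stk_cons : ∀ (w : List Char) (c : Char) (k : Nat) (rest : List (Char × Nat)),
    stk w = (c, k) :: rest →
    (∃ w', w = w' ++ [c] ∧ stk w' = rest) ∧ (2 ≤ k → ∃ rest', rest = (c, k - 1) :: rest') := by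
  intro w
  induction w using List.reverseRecOn with
  | nil => intro c k rest h; simp [stk] at h
  | append_singleton w d _ =>
    intro c k rest h
    rw [stk_append_one] at h
    cases hw : stk w with
    | nil =>
      rw [hw] at h; simp [pushC] at h
      obtain ⟨⟨h1, h2⟩, h3⟩ := h
      subst h1; subst h2
      exact ⟨⟨w, rfl, by rw [hw, h3]⟩, by omega⟩
    | cons p r =>
      obtain ⟨e, m⟩ := p
      rw [hw] at h
      by_cases he : e = d
      · subst he
        simp [pushC] at h
        obtain ⟨⟨h1, h2⟩, h3⟩ := h
        subst h1; subst h2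
        refine ⟨⟨w, rfl, by rw [hw, ← h3]⟩, ?_⟩
        intro _
        exact ⟨r, by rw [← h3]; simp⟩
      · simp [pushC, he] at h
        obtain ⟨⟨h1, h2⟩, h3⟩ := h
        subst h1; subst h2
        refine ⟨⟨w, rfl, by rw [hw, ← h3]⟩, by omega⟩

def hasTriple (l : List Char) : Prop := ∃ u x v, l = u ++ x :: x :: x :: v

-- any triple makes delFirst fire
theorem delFirst_of_triple : ∀ (u : List Char) (x : Char) (v : List Char),
    delFirst (u ++ x :: x :: x :: v) ≠ none := by
  intro u
  induction u with
  | nil => intro x v; simp [delFirst]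
  | cons a u ih =>
    intro x v
    have hlen : ∃ b c rest, u ++ x :: x :: x :: v = b :: c :: rest := by
      cases u with
      | nil => exact ⟨x, x, x :: v, rfl⟩
      | cons b u' =>
        cases u' with
        | nil => exact ⟨b, x, x :: x :: v, rfl⟩
        | cons c u'' => exact ⟨b, c, u'' ++ x :: x :: x :: v, rfl⟩
    obtain ⟨b, c, rest, hbc⟩ := hlen
    simp only [List.cons_append, hbc, delFirst]
    split
    · simp
    · rw [← hbc]
      intro hmap
      exact ih x v (Option.map_eq_none_iff.mp hmap)

theorem hasTriple_delFirst {l : List Char} (h : hasTriple l) : delFirst l ≠ none := by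
  obtain ⟨u, x, v, rfl⟩ := h
  exact delFirst_of_triple u x v

-- full characterisation of a successful delFirst: leftmost triple deleted
theorem delFirst_some : ∀ {l t : List Char}, delFirst l = some t →
    ∃ u x v, l = u ++ x :: x :: x :: v ∧ t = u ++ v ∧ delFirst (u ++ [x, x]) = none := by
  intro l
  induction l with
  | nil => intro t h; simp [delFirst] at h
  | cons a m ih =>
    intro t h
    match m, h with
    | [], h => simp [delFirst] at h
    | [b], h => simp [delFirst] at h
    | b :: c :: rest, h =>
      simp only [delFirst] at h
      split at h
      · next heq =>
        obtain ⟨rfl, rfl⟩ := heq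
        injection h with ht
        exact ⟨[], a, rest, rfl, ht.symm, by simp [delFirst]⟩
      · next hne =>
        rcases Option.map_eq_some_iff.mp h with ⟨t', ht', rfl⟩
        obtain ⟨u', x, v, hdec, rfl, hTF⟩ := ih ht'
        refine ⟨a :: u', x, v, by simp [hdec], rfl, ?_⟩
        -- head triple in a :: (u' ++ [x,x]) is excluded since the first two chars of
        -- u' ++ [x,x] are b, c; the rest of the scan returns none by hTF
        match u', hdec, hTF with
        | [], hdec, hTF =>
          obtain ⟨hb, hc⟩ : x = b ∧ x = c := by
            constructor <;> · injection hdec with h1 h2; try (injection h2 with h2 h3); simp_all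
          subst hb; subst hc
          have : ¬ a = x := fun hax => hne ⟨hax, rfl⟩
          simp [delFirst, this]
        | [d], hdec, hTF =>
          obtain ⟨hb, hc⟩ : d = b ∧ x = c := by
            constructor <;> · injection hdec with h1 h2; try (injection h2 with h2 h3); simp_all
          subst hb; subst hc
          simp only [List.cons_append, List.nil_append, delFirst] at hTF ⊢
          split
          · next habc => exact absurd habc hne
          · rw [Option.map_eq_none_iff]
            simpa using hTF
        | e :: f :: u'', hdec, hTF =>
          obtain ⟨hb, hc⟩ : e = b ∧ f = c := by
            constructor <;> · injection hdec with h1 h2; try (injection h2 with h2 h3); simp_all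
          subst hb; subst hc
          simp only [List.cons_append, delFirst] at hTF ⊢
          split
          · next habc => exact absurd habc hne
          · rw [Option.map_eq_none_iff]
            simpa using hTF

theorem delFirst_prefix {u z : List Char} (h : delFirst (u ++ z) = none) : delFirst u = none := by
  by_contra hne
  cases hd : delFirst u with
  | none => exact hne hd
  | some t =>
    obtain ⟨a, x, v, rfl, _, _⟩ := delFirst_some hd
    exact delFirst_of_triple a x (v ++ z) (by simpa using h)

-- on a triple-free string A's stack is the canonical stack (no pop ever fires)
theorem foldl_stepA_tf : ∀ (w : List Char), delFirst w = none →
    w.foldl stepA [] = stk w := by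
  intro w
  induction w using List.reverseRecOn with
  | nil => simp [stk]
  | append_singleton w c ih =>
    intro h
    have hw : delFirst w = none := delFirst_prefix h
    rw [List.foldl_append, ih hw, stk_append_one]
    simp only [List.foldl_cons, List.foldl_nil]
    cases hs : stk w with
    | nil => simp [stepA, pushC]
    | cons p rest =>
      obtain ⟨d, k⟩ := p
      by_cases hd : d = c
      · subst hd
        have hk : k ≤ 1 := by
          by_contra hk2
          obtain ⟨h1, h2⟩ := stk_cons w d k rest hs
          obtain ⟨rest', hr⟩ := h2 (by omega)
          obtain ⟨w1, hw1, hs1⟩ := h1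
          obtain ⟨⟨w2, hw2, _⟩, _⟩ := stk_cons w1 d (k - 1) rest' (by rw [hs1, hr])
          have : hasTriple (w ++ [d]) :=
            ⟨w2, d, [], by rw [hw1, hw2]; simp⟩
          exact hasTriple_delFirst this h
        have hk1 : ¬ (k + 1 > 2) := by omega
        simp [stepA, pushC, hk1]
      · simp [stepA, pushC, hd]

theorem popLoopA_one (st : List (Char × Nat)) : popLoopA st 1 = st := by
  cases st <;> simp [popLoopA]

-- the last character of w is the head character of stk w
theorem stk_not_end (w : List Char) (x : Char) (h : ∀ w', w ≠ w' ++ [x]) :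
    ∀ k rest, stk w ≠ (x, k) :: rest := by
  intro k rest hc
  obtain ⟨⟨w', hw', _⟩, _⟩ := stk_cons w x k rest hc
  exact h w' hw'

-- processing the leftmost triple pops it off the stack again
theorem foldl_del {l t : List Char} (h : delFirst l = some t) :
    l.foldl stepA [] = t.foldl stepA [] := by
  obtain ⟨u, x, v, rfl, rfl, hTF⟩ := delFirst_some h
  have hassoc : u ++ x :: x :: x :: v = (u ++ [x, x]) ++ x :: v := by simp
  rw [hassoc, List.foldl_append, foldl_stepA_tf _ hTF]
  have hu : delFirst u = none := delFirst_prefix hTF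
  have hux : ∀ w', u ≠ w' ++ [x] := by
    intro w' hw'
    exact hasTriple_delFirst ⟨w', x, [], by rw [hw']; simp⟩ hTF
  have hstk : stk (u ++ [x, x]) = (x, 2) :: (x, 1) :: stk u := by
    have h1 : stk (u ++ [x]) = (x, 1) :: stk u := by
      rw [stk_append_one]
      cases hs : stk u with
      | nil => simp [pushC]
      | cons p rest =>
        obtain ⟨d, k⟩ := p
        have hd : d ≠ x := fun hdx => stk_not_end u x hux k rest (hdx ▸ hs)
        simp [pushC, hd]
    have h2 : u ++ [x, x] = (u ++ [x]) ++ [x] := by simp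
    rw [h2, stk_append_one, h1]
    simp [pushC]
  rw [hstk]
  simp only [List.foldl_cons]
  have hstep : stepA ((x, 2) :: (x, 1) :: stk u) x = stk u := by
    simp [stepA, popLoopA, popLoopA_one]
  rw [hstep, ← foldl_stepA_tf u hu, ← List.foldl_append]

theorem key (l : List Char) : (l.foldl stepA []).reverse.map Prod.fst = fixB l := by
  cases h : delFirst l with
  | none => rw [fixB_none h, foldl_stepA_tf l h, rep_stk]
  | some t =>
    rw [fixB_some h, foldl_del h]
    exact key t
termination_by l.length
decreasing_by exact delFirst_length h

theorem push_fold (st : List (Char × Nat)) : ∀ (acc : List Char),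
    st.foldl (fun (res : String) p => res.push p.1) (String.ofList acc)
      = String.ofList (acc ++ st.map Prod.fst) := by
  induction st with
  | nil => simp
  | cons p rest ih =>
    intro acc
    simp only [List.foldl_cons, List.map_cons]
    have hpush : (String.ofList acc).push p.1 = String.ofList (acc ++ [p.1]) := by
      apply String.toList_inj.mp; simp
    rw [hpush, ih]
    simp

-- ===== VERDICT (by name: the statement is the Claim_ definition above) =====
theorem removeContinuous_spec : Claim_equal_removeContinuous := by
  intro s _
  unfold Spec_removeContinuous removeContinuous removeContinuous_alt
  have hempty : ("" : String) = String.ofList [] := by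
    apply String.toList_inj.mp; simp
  have := push_fold ((s.toList.foldl stepA []).reverse) []
  simp only [List.nil_append] at this
  rw [hempty, this, key s.toList]
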